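-- pv_equiv track=rewrite | github.com/DanielMarkusHug/qubit-lab | Version 9/app/pdf_report.py | _type_ids_from_rows
-- ===== SOURCE A (Python) =====
-- from typing import Any, Iterable, Mapping
--
-- def _type_ids_from_rows(rows: Iterable[Mapping[str, Any]]) -> list[str]:
--     ids: set[str] = set()
--     for row in rows:
--         for key in row.keys():
--             if key.startswith("type_"):
--                 ids.add(key.split("_", 2)[0] + "_" + key.split("_", 2)[1] if key.count("_") >= 2 else key)
--     ordered = [f"type_{letter}" for letter in "abcde"]
--     return [type_id for type_id in ordered if type_id in ids]
-- ===== SOURCE B (Python) =====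
-- def _type_ids_from_rows(rows):
--     row_list = list(rows)  # survive a one-shot iterable; scanned once per target
--     result = []
--     for letter in "abcde":
--         target = f"type_{letter}"
--         if any(key == target or key.startswith(target + "_")
--                for row in row_list for key in row.keys()):
--             result.append(target)
--     return result
-- ===== Notes on version B (the rewrite author's own statement) =====
-- stated objective: alternative
-- what changed: Instead of one pass over all keys building a set of split('_',2)-normalized ids and filtering the fixed order list against it, B keeps no set: for each of the five fixed targets it scans the materialized rows once and includes the target iff some key equals it or starts with it plus '_'.
import Mathlib
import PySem

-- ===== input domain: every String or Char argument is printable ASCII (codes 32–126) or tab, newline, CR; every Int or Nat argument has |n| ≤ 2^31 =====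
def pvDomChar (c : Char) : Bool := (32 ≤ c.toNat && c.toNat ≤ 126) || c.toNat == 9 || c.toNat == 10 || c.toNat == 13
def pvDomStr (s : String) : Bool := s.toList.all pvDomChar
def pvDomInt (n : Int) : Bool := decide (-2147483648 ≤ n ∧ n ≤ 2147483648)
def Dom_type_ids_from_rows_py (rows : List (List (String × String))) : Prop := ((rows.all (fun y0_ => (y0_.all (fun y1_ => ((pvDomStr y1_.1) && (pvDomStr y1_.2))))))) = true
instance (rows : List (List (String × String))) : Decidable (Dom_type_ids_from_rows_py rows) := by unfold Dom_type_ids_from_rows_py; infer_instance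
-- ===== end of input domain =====

-- B replaces A's one-pass set of split('_',2)-normalized ids by five per-target presence scans of the rows, no set kept; alternative decomposition, same results.

-- ===== PORT A =====
-- A's inline conditional `key.split("_",2)[0]+"_"+key.split("_",2)[1] if key.count("_")>=2 else key`, extracted as a helper
def pvNormA (key : String) : String :=
  if 2 ≤ PySem.Str.count key "_" then
    PySem.List.pyGetD ((PySem.Str.splitMax? key "_" 2).getD []) 0 "" ++ "_" ++
      PySem.List.pyGetD ((PySem.Str.splitMax? key "_" 2).getD []) 1 ""
  else key

def type_ids_from_rows_py (rows : List (List (String × String))) : List String :=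
  let ids : PySem.Set String :=
    rows.foldl (fun ids row =>
      row.foldl (fun ids kv =>
        if PySem.Str.startswith kv.1 "type_" then PySem.Set.add ids (pvNormA kv.1) else ids) ids)
      PySem.Set.empty
  let ordered := ("abcde".toList).map (fun letter => "type_" ++ String.singleton letter)
  ordered.filter (fun type_id => PySem.Set.contains ids type_id)

-- ===== PORT B =====
def pvAnyMatch (rowList : List (List (String × String))) (target : String) : Bool :=
  rowList.any (fun row =>
    row.any (fun kv => kv.1 == target || PySem.Str.startswith kv.1 (target ++ "_")))

def type_ids_from_rows_py_alt (rows : List (List (String × String))) : List String :=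
  ("abcde".toList).foldl (fun result letter =>
    if pvAnyMatch rows ("type_" ++ String.singleton letter) then
      result ++ ["type_" ++ String.singleton letter]
    else result) []

-- ===== PRECONDITION & SPEC =====
def Spec_type_ids_from_rows_py (rows : List (List (String × String))) (out : List String) : Prop := out = type_ids_from_rows_py_alt rows
instance (rows : List (List (String × String))) (out : List String) : Decidable (Spec_type_ids_from_rows_py rows out) := by unfold Spec_type_ids_from_rows_py; infer_instance

-- ===== CLAIM (what is proved, stated in full; the proofs are below) =====
def Claim_equal_type_ids_from_rows_py : Prop := ∀ (rows : List (List (String × String))), Dom_type_ids_from_rows_py rows → Spec_type_ids_from_rows_py rows (type_ids_from_rows_py rows)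

-- ===== LEMMAS AND PROOFS =====

-- Python's key.count("_") counts occurrences of the single character '_'
theorem countgo_eq (fuel : ℕ) : ∀ (l : List Char) (acc : ℕ), l.length ≤ fuel →
    PySem.Chars.count.go ['_'] fuel l acc = acc + l.count '_' := by
  induction fuel with
  | zero => intro l acc h; rw [List.length_eq_zero_iff.mp (Nat.le_zero.mp h)]; simp [PySem.Chars.count.go]
  | succ n ih =>
    intro l acc h
    cases l with
    | nil => simp [PySem.Chars.count.go]
    | cons x t =>
      rw [PySem.Chars.count.go]
      by_cases hx : x = '_'
      · subst hx
        simp only [List.isPrefixOf, BEq.rfl, Bool.true_and, if_true]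
        have hd : List.drop ['_'].length ('_' :: t) = t := rfl
        rw [hd, ih t (acc+1) (by simpa using h)]
        simp; omega
      · have hp : List.isPrefixOf ['_'] (x :: t) = false := by
          simp [List.isPrefixOf]; exact fun hh => absurd hh.symm hx
        rw [hp]
        simp only [Bool.false_eq_true, if_false]
        rw [ih t acc (by simpa using h)]
        simp [hx]

theorem count_single (l : List Char) : PySem.Chars.count l ['_'] = l.count '_' := by
  simp [PySem.Chars.count, countgo_eq l.length l 0 le_rfl]

theorem prefixOf_underscore (x : Char) (t : List Char) :
    List.isPrefixOf ['_'] (x :: t) = (x == '_') := by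
  simp [List.isPrefixOf, BEq.comm]

-- key.split("_", 2): the three states of the splitter, by remaining maxsplit budget
theorem go0_eq (fuel : ℕ) (l cur : List Char) (acc : List (List Char)) :
    PySem.Chars.splitOnMax.go ['_'] fuel 0 l cur acc = ((cur.reverse ++ l) :: acc).reverse := by
  cases fuel <;> cases l <;> simp [PySem.Chars.splitOnMax.go]

theorem go1_eq (fuel : ℕ) : ∀ (l cur : List Char) (acc : List (List Char)), l.length < fuel →
    PySem.Chars.splitOnMax.go ['_'] fuel 1 l cur acc =
      acc.reverse ++ (if '_' ∈ l then
        [cur.reverse ++ l.takeWhile (· != '_'), (l.dropWhile (· != '_')).tail]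
      else [cur.reverse ++ l]) := by
  induction fuel with
  | zero => intro l cur acc h; omega
  | succ n ih =>
    intro l cur acc h
    cases l with
    | nil => simp [PySem.Chars.splitOnMax.go]
    | cons x t =>
      rw [PySem.Chars.splitOnMax.go]
      simp only [prefixOf_underscore]
      by_cases hx : x = '_'
      · subst hx
        simp only [BEq.rfl, if_true]
        have hd : List.drop ['_'].length ('_' :: t) = t := rfl
        rw [if_neg (by omega), hd, go0_eq]
        simp
      · have hb : (x == '_') = false := by simp [hx]
        rw [if_neg (by omega), hb]
        simp only [Bool.false_eq_true, if_false]
        rw [ih t (x :: cur) acc (by simpa using h)]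
        have hor : ('_' ∈ x :: t) = ('_' ∈ t) := by
          simp only [List.mem_cons]
          exact propext (or_iff_right (fun e => hx (Eq.symm e)))
        simp [hor, hx]

theorem go2_eq (fuel : ℕ) (l cur : List Char) (acc : List (List Char)) (h : l.length < fuel) :
    PySem.Chars.splitOnMax.go ['_'] fuel 2 l cur acc =
      acc.reverse ++ (if '_' ∈ l then
        (cur.reverse ++ l.takeWhile (· != '_')) ::
          (if '_' ∈ (l.dropWhile (· != '_')).tail then
            [((l.dropWhile (· != '_')).tail).takeWhile (· != '_'),
             ((((l.dropWhile (· != '_')).tail).dropWhile (· != '_'))).tail]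
          else [(l.dropWhile (· != '_')).tail])
      else [cur.reverse ++ l]) := by
  induction fuel generalizing l cur acc with
  | zero => omega
  | succ n ih =>
    cases l with
    | nil => simp [PySem.Chars.splitOnMax.go]
    | cons x t =>
      rw [PySem.Chars.splitOnMax.go]
      simp only [prefixOf_underscore]
      by_cases hx : x = '_'
      · subst hx
        simp only [BEq.rfl, if_true]
        have hd : List.drop ['_'].length ('_' :: t) = t := rfl
        rw [if_neg (by omega), hd, go1_eq n t [] (cur.reverse :: acc) (by simpa using h)]
        simp
      · have hb : (x == '_') = false := by simp [hx]
        rw [if_neg (by omega), hb]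
        simp only [Bool.false_eq_true, if_false]
        rw [ih t (x :: cur) acc (by simpa using h)]
        have hor : ('_' ∈ x :: t) = ('_' ∈ t) := by
          simp only [List.mem_cons]
          exact propext (or_iff_right (fun e => hx (Eq.symm e)))
        simp [hor, hx]

theorem splitOnMax2_eq (l : List Char) :
    PySem.Chars.splitOnMax l ['_'] 2 =
      (if '_' ∈ l then
        (l.takeWhile (· != '_')) ::
          (if '_' ∈ (l.dropWhile (· != '_')).tail then
            [((l.dropWhile (· != '_')).tail).takeWhile (· != '_'),
             ((((l.dropWhile (· != '_')).tail).dropWhile (· != '_'))).tail]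
          else [(l.dropWhile (· != '_')).tail])
      else [l]) := by
  rw [PySem.Chars.splitOnMax, if_neg (by omega)]
  rw [show (2:Int).toNat = 2 from rfl, go2_eq (l.length + 1) l [] [] (by omega)]
  simp

-- A's normalization of a key that starts with "type_", at the character-list level
theorem norm_toList (r : List Char) (key : String) (hk : key.toList = 't'::'y'::'p'::'e'::'_'::r) :
    (pvNormA key).toList =
      if 1 ≤ r.count '_' then 't'::'y'::'p'::'e'::'_'::(r.takeWhile (· != '_'))
      else 't'::'y'::'p'::'e'::'_'::r := by
  have hc : PySem.Str.count key "_" = 1 + r.count '_' := by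
    rw [PySem.Str.count_eq, hk]
    show PySem.Chars.count _ ['_'] = _
    rw [count_single]
    simp
    omega
  unfold pvNormA
  by_cases h1 : 1 ≤ r.count '_'
  · rw [if_pos (by omega), if_pos h1]
    have hmem : '_' ∈ r := List.count_pos_iff.mp (by omega)
    have hsp : PySem.Str.splitMax? key "_" 2 =
        some [String.ofList ['t','y','p','e'], String.ofList (r.takeWhile (· != '_')),
              String.ofList ((r.dropWhile (· != '_')).tail)] := by
      show Option.map _ (PySem.Chars.splitMax? key.toList "_".toList 2) = _
      rw [hk]
      show Option.map _ (if _ then _ else some (PySem.Chars.splitOnMax _ _ _)) = _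
      rw [if_neg (by simp), show ("_" : String).toList = ['_'] from rfl, splitOnMax2_eq]
      have : '_' ∈ ('t'::'y'::'p'::'e'::'_'::r) := by simp
      rw [if_pos this]
      have e1 : List.takeWhile (· != '_') ('t'::'y'::'p'::'e'::'_'::r) = ['t','y','p','e'] := by simp
      have e2 : List.dropWhile (· != '_') ('t'::'y'::'p'::'e'::'_'::r) = '_'::r := by simp
      rw [e1, e2]
      simp only [List.tail_cons]
      rw [if_pos hmem]
      simp
    rw [hsp]
    simp [PySem.List.pyGetD, PySem.List.pyGet?, PySem.List.pyIdx?]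
  · rw [if_neg (by omega), if_neg h1, hk]

theorem takeWhile_single_iff (c : Char) (hc : c ≠ '_') (r : List Char) (hm : '_' ∈ r) :
    r.takeWhile (· != '_') = [c] ↔ [c, '_'] <+: r := by
  constructor
  · intro h
    cases r with
    | nil => simp at hm
    | cons x t =>
      rw [List.takeWhile_cons] at h
      by_cases hx : x = '_'
      · simp [hx] at h
      · rw [if_pos (by simp [hx])] at h
        injection h with hxc ht
        subst hxc
        have hm' : '_' ∈ t := by
          rcases List.mem_cons.mp hm with h' | h'
          · exact absurd h'.symm hx
          · exact h'
        cases t with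
        | nil => simp at hm'
        | cons y u =>
          rw [List.takeWhile_cons] at ht
          by_cases hy : y = '_'
          · subst hy; exact ⟨u, rfl⟩
          · rw [if_pos (by simp [hy])] at ht; simp at ht
  · rintro ⟨s, rfl⟩
    simp [hc]

theorem toList_target (c : Char) : ("type_" ++ String.singleton c).toList = ['t','y','p','e','_',c] := by
  rw [String.toList_append, String.toList_singleton]
  rfl

-- the heart of the equivalence: a key contributes A's normalized id "type_<c>" exactly when
-- it equals "type_<c>" or starts with "type_<c>_" — B's test
theorem key_iff (c : Char) (hc : c ≠ '_') (key : String) :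
    (PySem.Str.startswith key "type_" = true ∧ pvNormA key = "type_" ++ String.singleton c)
    ↔ (key = "type_" ++ String.singleton c ∨
        PySem.Str.startswith key ("type_" ++ String.singleton c ++ "_") = true) := by
  have hsw : PySem.Str.startswith key "type_" = true ↔ ['t','y','p','e','_'] <+: key.toList := by
    rw [PySem.Str.startswith_eq, PySem.Chars.startswith_iff]
    rfl
  have hsw2 : PySem.Str.startswith key ("type_" ++ String.singleton c ++ "_") = true ↔
      ['t','y','p','e','_',c,'_'] <+: key.toList := by
    rw [PySem.Str.startswith_eq, PySem.Chars.startswith_iff]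
    rw [String.toList_append, toList_target]
    rfl
  have heqT : key = "type_" ++ String.singleton c ↔ key.toList = ['t','y','p','e','_',c] := by
    constructor
    · intro h; rw [h, toList_target]
    · intro h; exact String.toList_injective (by rw [h, toList_target])
  have heqN : pvNormA key = "type_" ++ String.singleton c ↔
      (pvNormA key).toList = ['t','y','p','e','_',c] := by
    constructor
    · intro h; rw [h, toList_target]
    · intro h; exact String.toList_injective (by rw [h, toList_target])
  by_cases hp : ['t','y','p','e','_'] <+: key.toList
  · obtain ⟨r, hr⟩ := hp
    have hk : key.toList = 't'::'y'::'p'::'e'::'_'::r := hr.symm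
    rw [hsw, hsw2, heqT, heqN, hk, norm_toList r key hk]
    by_cases h1 : 1 ≤ r.count '_'
    · have hmem : '_' ∈ r := List.count_pos_iff.mp (by omega)
      rw [if_pos h1]
      have hpre : ('t'::'y'::'p'::'e'::'_'::r = ['t','y','p','e','_',c]) ↔ r = [c] := by
        simp
      have hpre2 : (['t','y','p','e','_',c,'_'] <+: 't'::'y'::'p'::'e'::'_'::r) ↔ [c,'_'] <+: r := by
        have := List.prefix_append_right_inj (l₁ := [c,'_']) (l₂ := r) ['t','y','p','e','_']
        exact this
      rw [hpre2]
      have hrc : ¬ (r = [c]) := by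
        rintro rfl
        rcases List.mem_singleton.mp hmem with h'
        exact hc h'.symm
      constructor
      · rintro ⟨-, h⟩
        right
        exact (takeWhile_single_iff c hc r hmem).mp (by simpa using h)
      · rintro (h | h)
        · exact absurd (hpre.mp (by simpa using h)) hrc
        · refine ⟨⟨r, rfl⟩, ?_⟩
          have := (takeWhile_single_iff c hc r hmem).mpr h
          simp [this]
    · rw [if_neg h1]
      have hnm : '_' ∉ r := fun h => h1 (List.count_pos_iff.mpr h)
      constructor
      · rintro ⟨-, h⟩
        left
        simpa using h
      · rintro (h | h)
        · simp at h
          refine ⟨⟨r, rfl⟩, by simp [h]⟩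
        · exfalso
          have hpre2 : [c,'_'] <+: r := by
            have := List.prefix_append_right_inj (l₁ := [c,'_']) (l₂ := r) ['t','y','p','e','_']
            exact this.mp (by simpa using h)
          exact hnm (hpre2.mem (by simp))
  · constructor
    · rintro ⟨h, -⟩
      exact absurd (hsw.mp h) hp
    · rintro (h | h)
      · exact absurd (heqT.mp h ▸ ⟨[c], rfl⟩) hp
      · exact absurd (List.IsPrefix.trans ⟨[c,'_'], rfl⟩ (hsw2.mp h)) hp

-- membership in A's accumulated set, over one row and over all rows
theorem mem_inner_fold (row : List (String × String)) : ∀ (s : PySem.Set String) (x : String),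
    (x ∈ row.foldl (fun ids kv =>
      if PySem.Str.startswith kv.1 "type_" then PySem.Set.add ids (pvNormA kv.1) else ids) s) ↔
    x ∈ s ∨ ∃ kv ∈ row, PySem.Str.startswith kv.1 "type_" = true ∧ pvNormA kv.1 = x := by
  induction row with
  | nil => simp
  | cons kv t ih =>
    intro s x
    rw [List.foldl_cons]
    by_cases h : PySem.Str.startswith kv.1 "type_" = true
    · rw [if_pos h, ih]
      rw [PySem.Set.mem_add]
      constructor
      · rintro ((hs | he) | ⟨kv', hm, hp⟩)
        · exact Or.inl hs
        · exact Or.inr ⟨kv, List.mem_cons_self .., h, he.symm⟩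
        · exact Or.inr ⟨kv', List.mem_cons_of_mem _ hm, hp⟩
      · rintro (hs | ⟨kv', hm, hp, he⟩)
        · exact Or.inl (Or.inl hs)
        · rcases List.mem_cons.mp hm with rfl | hm'
          · exact Or.inl (Or.inr he.symm)
          · exact Or.inr ⟨kv', hm', hp, he⟩
    · rw [if_neg h, ih]
      constructor
      · rintro (hs | ⟨kv', hm, hp⟩)
        · exact Or.inl hs
        · exact Or.inr ⟨kv', List.mem_cons_of_mem _ hm, hp⟩
      · rintro (hs | ⟨kv', hm, hp, he⟩)
        · exact Or.inl hs
        · rcases List.mem_cons.mp hm with rfl | hm'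
          · exact absurd hp h
          · exact Or.inr ⟨kv', hm', hp, he⟩

theorem mem_ids_fold (rows : List (List (String × String))) : ∀ (s : PySem.Set String) (x : String),
    (x ∈ rows.foldl (fun ids row => row.foldl (fun ids kv =>
      if PySem.Str.startswith kv.1 "type_" then PySem.Set.add ids (pvNormA kv.1) else ids) ids) s) ↔
    x ∈ s ∨ ∃ row ∈ rows, ∃ kv ∈ row, PySem.Str.startswith kv.1 "type_" = true ∧ pvNormA kv.1 = x := by
  induction rows with
  | nil => simp
  | cons row t ih =>
    intro s x
    rw [List.foldl_cons, ih, mem_inner_fold]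
    constructor
    · rintro ((hs | ⟨kv, hm, hp⟩) | ⟨row', hr, hrest⟩)
      · exact Or.inl hs
      · exact Or.inr ⟨row, List.mem_cons_self .., kv, hm, hp⟩
      · exact Or.inr ⟨row', List.mem_cons_of_mem _ hr, hrest⟩
    · rintro (hs | ⟨row', hr, hrest⟩)
      · exact Or.inl (Or.inl hs)
      · rcases List.mem_cons.mp hr with rfl | hr'
        · exact Or.inl (Or.inr hrest)
        · exact Or.inr ⟨row', hr', hrest⟩

-- per target: A's set membership test equals B's presence scan
theorem contains_eq_any (rows : List (List (String × String))) (c : Char) (hc : c ≠ '_') :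
    PySem.Set.contains
      (rows.foldl (fun ids row => row.foldl (fun ids kv =>
        if PySem.Str.startswith kv.1 "type_" then PySem.Set.add ids (pvNormA kv.1) else ids) ids)
        PySem.Set.empty)
      ("type_" ++ String.singleton c)
    = pvAnyMatch rows ("type_" ++ String.singleton c) := by
  rw [Bool.eq_iff_iff]
  rw [show ∀ (s : PySem.Set String) (x : String), (PySem.Set.contains s x = true) ↔ x ∈ s from
    fun s x => by simp [PySem.Set.contains]]
  rw [mem_ids_fold]
  simp only [PySem.Set.empty, List.not_mem_nil, false_or]
  rw [show (pvAnyMatch rows ("type_" ++ String.singleton c) = true) ↔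
      ∃ row ∈ rows, ∃ kv ∈ row, (kv.1 = ("type_" ++ String.singleton c) ∨
        PySem.Str.startswith kv.1 ("type_" ++ String.singleton c ++ "_") = true) from by
    simp [pvAnyMatch, List.any_eq_true]]
  constructor
  · rintro ⟨row, hr, kv, hm, hp, he⟩
    exact ⟨row, hr, kv, hm, (key_iff c hc kv.1).mp ⟨hp, he⟩⟩
  · rintro ⟨row, hr, kv, hm, hd⟩
    obtain ⟨hp, he⟩ := (key_iff c hc kv.1).mpr hd
    exact ⟨row, hr, kv, hm, hp, he⟩

theorem ab_eq (rows : List (List (String × String))) :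
    type_ids_from_rows_py rows = type_ids_from_rows_py_alt rows := by
  simp only [type_ids_from_rows_py, type_ids_from_rows_py_alt]
  rw [PySem.List.foldl_append_if
    (p := fun letter => pvAnyMatch rows ("type_" ++ String.singleton letter))
    (f := fun letter => "type_" ++ String.singleton letter)]
  rw [List.filter_map, List.nil_append]
  apply congrArg
  apply List.filter_congr
  intro x hx
  have hx5 : x ∈ ['a','b','c','d','e'] := by
    rw [show ("abcde" : String).toList = ['a','b','c','d','e'] from rfl] at hx
    exact hx
  have hc : x ≠ '_' := by
    have h5 : x = 'a' ∨ x = 'b' ∨ x = 'c' ∨ x = 'd' ∨ x = 'e' := by simpa using hx5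
    rcases h5 with rfl | rfl | rfl | rfl | rfl <;> decide
  exact contains_eq_any rows x hc

-- ===== VERDICT (by name: the statement is the Claim_ definition above) =====
theorem type_ids_from_rows_py_spec : Claim_equal_type_ids_from_rows_py := by
  intro rows _
  unfold Spec_type_ids_from_rows_py
  exact ab_eq rows
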